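-- pv_equiv track=rewrite | github.com/Lukman-01/Coderbyte-Solutions-In-Python | Arrays/Changing_Sequence.py | ChangingSequence
-- ===== SOURCE A (Python) =====
-- def ChangingSequence(arr):
--     direction = None
--
--     for i in range(1, len(arr)):
--         if direction is None:
--             if arr[i] == arr[i-1]:
--                 continue
--             elif arr[i] > arr[i-1]:
--                 direction = 'increasing'
--             else:
--                 direction = 'decreasing'
--         elif direction == 'increasing':
--             if arr[i] <= arr[i-1]:
--                 return i - 1
--         elif direction == 'decreasing':
--             if arr[i] >= arr[i-1]:
--                 return i - 1
--
--     return -1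
-- ===== SOURCE B (Python) =====
-- def ChangingSequence(arr):
--     # sign table of consecutive differences: -1 / 0 / +1
--     signs = [(arr[k + 1] > arr[k]) - (arr[k + 1] < arr[k]) for k in range(len(arr) - 1)]
--     # phase 1: first nonzero sign fixes the direction
--     k0 = None
--     for k, s in enumerate(signs):
--         if s != 0:
--             k0 = k
--             break
--     if k0 is None:
--         return -1
--     s0 = signs[k0]
--     # phase 2: first later position whose sign differs (0 counts as a change)
--     for k, s in enumerate(signs[k0 + 1:], start=k0 + 1):
--         if s != s0:
--             return k
--     return -1
-- ===== Notes on version B (the rewrite author's own statement) =====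
-- stated objective: alternative
-- what changed: Replaces A's single fused state-machine loop (a direction string updated while scanning elements) by a precomputed -1/0/+1 sign table of consecutive differences and two explicit passes over it: find the first nonzero sign, then the first later sign that differs.
import Mathlib
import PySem

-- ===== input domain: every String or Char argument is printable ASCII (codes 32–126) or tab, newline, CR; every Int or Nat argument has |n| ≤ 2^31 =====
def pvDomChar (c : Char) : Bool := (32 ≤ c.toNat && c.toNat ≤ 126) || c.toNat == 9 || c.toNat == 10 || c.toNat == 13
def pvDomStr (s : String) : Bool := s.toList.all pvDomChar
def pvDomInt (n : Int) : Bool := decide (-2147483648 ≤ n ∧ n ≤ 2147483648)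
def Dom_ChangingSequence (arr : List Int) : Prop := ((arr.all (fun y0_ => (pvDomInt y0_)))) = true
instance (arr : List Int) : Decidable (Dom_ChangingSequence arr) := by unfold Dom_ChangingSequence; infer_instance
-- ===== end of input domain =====

-- B is an alternative decomposition (sign table + two passes) of A's fused state-machine loop; same cost.

-- ===== PORT A =====
-- A's loop over i in range(1, len(arr)) reads the adjacent pair (arr[i-1], arr[i]);
-- ported as structural recursion over the list of adjacent pairs, carrying the
-- direction state (None / 'increasing' / 'decreasing') and the Python index i.
def goA : List (Int × Int) → Option String → Int → Int
  | [], _, _ => -1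
  | (prev, cur) :: rest, dir, i =>
    match dir with
    | none =>
      if cur = prev then goA rest none (i + 1)
      else if cur > prev then goA rest (some "increasing") (i + 1)
      else goA rest (some "decreasing") (i + 1)
    | some d =>
      if d = "increasing" then
        (if cur ≤ prev then i - 1 else goA rest (some d) (i + 1))
      else
        (if cur ≥ prev then i - 1 else goA rest (some d) (i + 1))

def ChangingSequence (arr : List Int) : Int := goA (arr.zip arr.tail) none 1

-- ===== PORT B =====
-- sign of a consecutive step, as Python's (a<b)-(b<a): -1 / 0 / +1
def stepSign (p : Int × Int) : Int := if p.2 > p.1 then 1 else if p.2 < p.1 then -1 else 0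

-- phase 1: index and value of the first nonzero sign
def firstNonzero : List Int → Nat → Option (Nat × Int)
  | [], _ => none
  | s :: rest, k => if s ≠ 0 then some (k, s) else firstNonzero rest (k + 1)

-- phase 2: first index from k whose sign differs from s0
def firstDiff : List Int → Int → Int → Int
  | [], _, _ => -1
  | s :: rest, s0, k => if s ≠ s0 then k else firstDiff rest s0 (k + 1)

def ChangingSequence_alt (arr : List Int) : Int :=
  let signs := (arr.zip arr.tail).map stepSign
  match firstNonzero signs 0 with
  | none => -1
  | some (k0, s0) => firstDiff (signs.drop (k0 + 1)) s0 ((k0 : Int) + 1)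

-- ===== PRECONDITION & SPEC =====
def Spec_ChangingSequence (arr : List Int) (out : Int) : Prop := out = ChangingSequence_alt arr
instance (arr : List Int) (out : Int) : Decidable (Spec_ChangingSequence arr out) := by unfold Spec_ChangingSequence; infer_instance

-- ===== CLAIM (what is proved, stated in full; the proofs are below) =====
def Claim_equal_ChangingSequence : Prop := ∀ (arr : List Int), Dom_ChangingSequence arr → Spec_ChangingSequence arr (ChangingSequence arr)

-- ===== LEMMAS AND PROOFS =====

theorem goA_inc (ps : List (Int × Int)) : ∀ (i : Int),
    goA ps (some "increasing") i = firstDiff (ps.map stepSign) 1 (i - 1) := by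
  induction ps with
  | nil => intro i; simp [goA, firstDiff]
  | cons p rest ih =>
    intro i
    obtain ⟨prev, cur⟩ := p
    by_cases h : cur ≤ prev
    · simp [goA, firstDiff, stepSign, h]
      omega
    · have hs : stepSign (prev, cur) = 1 := by simp [stepSign]; omega
      simp [goA, firstDiff, h, hs, ih (i + 1)]

theorem goA_dec (ps : List (Int × Int)) : ∀ (i : Int),
    goA ps (some "decreasing") i = firstDiff (ps.map stepSign) (-1) (i - 1) := by
  induction ps with
  | nil => intro i; simp [goA, firstDiff]
  | cons p rest ih =>
    intro i
    obtain ⟨prev, cur⟩ := p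
    by_cases h : prev ≤ cur
    · simp [goA, firstDiff, stepSign, h]
      omega
    · have hs : stepSign (prev, cur) = -1 := by simp [stepSign]; omega
      simp [goA, firstDiff, h, hs, ih (i + 1)]

theorem firstNonzero_ge (l : List Int) : ∀ (k k0 : Nat) (s0 : Int),
    firstNonzero l k = some (k0, s0) → k ≤ k0 := by
  induction l with
  | nil => intro k k0 s0 h; simp [firstNonzero] at h
  | cons s rest ih =>
    intro k k0 s0 h
    by_cases hs : s = 0
    · simp [firstNonzero, hs] at h
      have := ih (k + 1) k0 s0 h
      omega
    · simp [firstNonzero, hs] at h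
      omega

-- fused form of B's two phases, with the starting index generalized
def altCore (signs : List Int) (k : Nat) : Int :=
  match firstNonzero signs k with
  | none => -1
  | some (k0, s0) => firstDiff (signs.drop (k0 + 1 - k)) s0 ((k0 : Int) + 1)

theorem goA_none (ps : List (Int × Int)) : ∀ (k : Nat),
    goA ps none ((k : Int) + 1) = altCore (ps.map stepSign) k := by
  induction ps with
  | nil => intro k; simp [goA, altCore, firstNonzero]
  | cons p rest ih =>
    intro k
    obtain ⟨prev, cur⟩ := p
    by_cases heq : cur = prev
    · have hs : stepSign (prev, cur) = 0 := by simp [stepSign, heq]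
      have hrec : goA rest none ((k : Int) + 1 + 1) = altCore (rest.map stepSign) (k + 1) := by
        have := ih (k + 1)
        push_cast at this ⊢
        convert this using 2
      rw [show goA ((prev, cur) :: rest) none ((k : Int) + 1)
            = goA rest none ((k : Int) + 1 + 1) by simp [goA, heq], hrec]
      unfold altCore
      simp only [List.map_cons, hs, firstNonzero, ne_eq, not_true_eq_false, if_false]
      cases hfn : firstNonzero (rest.map stepSign) (k + 1) with
      | none => rfl
      | some v =>
        obtain ⟨k0, s0⟩ := v
        have hk0 := firstNonzero_ge _ _ _ _ hfn
        have : k0 + 1 - k = (k0 + 1 - (k + 1)) + 1 := by omega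
        simp [this]
    · by_cases hgt : cur > prev
      · have hs : stepSign (prev, cur) = 1 := by simp [stepSign]; omega
        have h1 : goA ((prev, cur) :: rest) none ((k : Int) + 1)
            = goA rest (some "increasing") ((k : Int) + 1 + 1) := by
          simp [goA, heq, hgt]
        rw [h1, goA_inc]
        unfold altCore
        simp only [List.map_cons, hs, firstNonzero]
        norm_num
      · have hs : stepSign (prev, cur) = -1 := by simp [stepSign]; omega
        have h1 : goA ((prev, cur) :: rest) none ((k : Int) + 1)
            = goA rest (some "decreasing") ((k : Int) + 1 + 1) := by
          simp [goA, heq]; omega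
        rw [h1, goA_dec]
        unfold altCore
        simp only [List.map_cons, hs, firstNonzero]
        norm_num

-- ===== VERDICT (by name: the statement is the Claim_ definition above) =====
theorem ChangingSequence_spec : Claim_equal_ChangingSequence := by
  intro arr _
  unfold Spec_ChangingSequence ChangingSequence ChangingSequence_alt
  have h := goA_none (arr.zip arr.tail) 0
  simpa [altCore] using h
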